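-- pv_equiv track=rewrite | github.com/Agentic-Environmental-Engineering/GymVerse | gem/gem/envs/RLVE/sum_gcd_env.py | _compute_sum_gcd_power
-- ===== SOURCE A (Python) =====
-- def _compute_sum_gcd_power(N: int, M: int, K: int) -> int:
--     """Compute sum_{i=1..N, j=1..M} gcd(i, j)^K using a multiplicative function and grouping.
--
--     The computation uses the identity:
--     sum_{i=1..N, j=1..M} gcd(i, j)^K = sum_{d=1..min(N, M)} f_K(d) * floor(N/d) * floor(M/d),
--     where f_K is multiplicative with
--     f_K(p^a) = p^{Ka} - p^{K(a-1)}.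
--
--     Args:
--         N: Upper bound for i.
--         M: Upper bound for j.
--         K: Exponent for GCD power.
--
--     Returns:
--         The computed sum as an integer.
--     """
--     limit = min(N, M)
--     if limit <= 0:
--         return 0
--
--     # Linear sieve to compute multiplicative function f_K at all integers up to limit
--     is_composite = [False] * (limit + 1)
--     f = [0] * (limit + 1)  # f[i] holds f_K(i)
--     primes: list[int] = []
--     g: list[int] = []  # g[j] = (primes[j])^K
--
--     # Base initialization
--     f[1] = 1
--     for i in range(2, limit + 1):
--         if not is_composite[i]:
--             primes.append(i)
--             gi = i ** K
--             g.append(gi)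
--             # f_K(p) = p^K - 1
--             f[i] = gi - 1
--
--         for j, p_j in enumerate(primes):
--             ip = i * p_j
--             if ip > limit:
--                 break
--             is_composite[ip] = True
--             if i % p_j == 0:
--                 # For prime power: f_K(p^{a+1}) = f_K(p^a) * p^K
--                 f[ip] = f[i] * g[j]
--                 break
--             else:
--                 # Multiplicativity for coprime factors: f_K(i * p) = f_K(i) * f_K(p)
--                 f[ip] = f[i] * (g[j] - 1)
--
--     # Prefix sum of f to allow range sum queries in grouping
--     for i in range(1, limit + 1):
--         f[i] = f[i] + f[i - 1]
--
--     # Grouping by equal floor divisions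
--     ans = 0
--     i = 1
--     while i <= limit:
--         ni = N // i
--         mi = M // i
--         nxt = min(N // ni, M // mi)
--         s = f[nxt] - f[i - 1]
--         ans += s * ni * mi
--         i = nxt + 1
--
--     return ans
-- ===== SOURCE B (Python) =====
-- def _compute_sum_gcd_power(N: int, M: int, K: int) -> int:
--     """Sum_{i<=N, j<=M} gcd(i,j)^K via a divisor-sieve (Mobius) transform and a direct sum.
--
--     f is initialized to f[1] = 1 (the multiplicative identity) and f[d] = d^K for
--     d >= 2, then turned into f_K = Id^K * mu by the harmonic-series sieve
--     f[m] -= f[d] over proper multiples m of each d; the answer is then summed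
--     directly over d without prefix sums or floor-division block grouping.
--     """
--     limit = min(N, M)
--     if limit <= 0:
--         return 0
--     f = [0, 1] + [d ** K for d in range(2, limit + 1)]
--     for d in range(1, limit + 1):
--         for m in range(2 * d, limit + 1, d):
--             f[m] -= f[d]
--     return sum(f[d] * (N // d) * (M // d) for d in range(1, limit + 1))
-- ===== Notes on version B (the rewrite author's own statement) =====
-- stated objective: simpler
-- what changed: Replaces the linear sieve (primes/g arrays, smallest-prime-factor recurrence) by a Mobius divisor sieve f[m] -= f[d] over multiples, and replaces the prefix-sum plus floor-division block grouping by a direct sum of f[d]*(N//d)*(M//d) over d.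
-- outside the precondition, e.g. on _compute_sum_gcd_power(2, 2, -1): A returns 3.5, B returns 3.5; on _compute_sum_gcd_power(3, 4, -2): A returns 9.61111111111111, B returns 9.61111111111111
import Mathlib
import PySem

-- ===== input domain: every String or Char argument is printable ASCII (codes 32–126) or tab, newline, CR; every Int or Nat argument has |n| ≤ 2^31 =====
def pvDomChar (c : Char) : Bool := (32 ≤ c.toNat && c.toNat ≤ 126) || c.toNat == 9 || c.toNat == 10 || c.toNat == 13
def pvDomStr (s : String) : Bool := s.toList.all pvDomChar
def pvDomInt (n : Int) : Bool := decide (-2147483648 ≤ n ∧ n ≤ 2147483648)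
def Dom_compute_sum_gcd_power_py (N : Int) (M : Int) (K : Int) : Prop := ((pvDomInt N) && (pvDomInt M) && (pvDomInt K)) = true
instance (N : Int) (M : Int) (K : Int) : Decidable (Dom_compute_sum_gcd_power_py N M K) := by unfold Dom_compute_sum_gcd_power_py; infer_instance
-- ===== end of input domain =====

-- B replaces the linear sieve by a Möbius divisor sieve and the prefix-sum/block-grouping by a direct sum (objective: simpler); equal return values on Pre_.

-- ===== PORT A =====
-- inner `for j, p_j in enumerate(primes): ... break` loop of the linear sieve
def pvSieveInnerA (limit i : Int) (primes g : Array Int) (j : Nat)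
    (isc : Array Bool) (f : Array Int) : Array Bool × Array Int :=
  match hj : primes[j]? with
  | none => (isc, f)
  | some p =>
    let ip := i * p
    if limit < ip then (isc, f)
    else
      let isc' := isc.setIfInBounds ip.toNat true
      if PySem.Int.mod i p == 0 then
        (isc', f.setIfInBounds ip.toNat (f.getD i.toNat 0 * g.getD j 0))
      else
        pvSieveInnerA limit i primes g (j+1) isc'
          (f.setIfInBounds ip.toNat (f.getD i.toNat 0 * (g.getD j 0 - 1)))
termination_by primes.size - j
decreasing_by
  have : j < primes.size := (Array.getElem?_eq_some_iff.mp hj).1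
  omega

-- one iteration of `for i in range(2, limit + 1)`
def pvSieveStepA (limit K : Int) (st : Array Bool × Array Int × Array Int × Array Int)
    (i : Int) : Array Bool × Array Int × Array Int × Array Int :=
  let isc := st.1
  let f := st.2.1
  let primes := st.2.2.1
  let g := st.2.2.2
  let fpg :=
    if isc.getD i.toNat false then (f, primes, g)
    else
      let gi := i ^ K.toNat
      (f.setIfInBounds i.toNat (gi - 1), primes.push i, g.push gi)
  let r := pvSieveInnerA limit i fpg.2.1 fpg.2.2 0 isc fpg.1
  (r.1, r.2, fpg.2.1, fpg.2.2)

-- `while i <= limit` grouping loop; fuel bounds the iteration count (i strictly increases each pass)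
def pvGroupLoopA (N M limit : Int) (f : Array Int) : Nat → Int → Int → Int
  | 0, _, ans => ans
  | fuel+1, i, ans =>
    if i ≤ limit then
      let ni := PySem.Int.floordiv N i
      let mi := PySem.Int.floordiv M i
      let nxt := min (PySem.Int.floordiv N ni) (PySem.Int.floordiv M mi)
      let s := f.getD nxt.toNat 0 - f.getD (i-1).toNat 0
      pvGroupLoopA N M limit f fuel (nxt+1) (ans + s * ni * mi)
    else ans

def compute_sum_gcd_power_py (N : Int) (M : Int) (K : Int) : Int :=
  let limit := min N M
  if limit ≤ 0 then 0
  else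
    let L := limit.toNat
    let isc0 : Array Bool := Array.replicate (L+1) false
    let f0 : Array Int := (Array.replicate (L+1) (0:Int)).setIfInBounds 1 1
    let st := (PySem.List.pyRange 2 (limit+1) 1).foldl (pvSieveStepA limit K) (isc0, f0, #[], #[])
    let f1 := (PySem.List.pyRange 1 (limit+1) 1).foldl
      (fun f i => f.setIfInBounds i.toNat (f.getD i.toNat 0 + f.getD (i-1).toNat 0)) st.2.1
    pvGroupLoopA N M limit f1 (L+1) 1 0

-- ===== PORT B =====
-- inner `for m in range(2*d, limit+1, d): f[m] -= f[d]`
def pvMobiusStepA (limit : Int) (f : Array Int) (d : Int) : Array Int :=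
  (PySem.List.pyRange (2*d) (limit+1) d).foldl
    (fun f m => f.setIfInBounds m.toNat (f.getD m.toNat 0 - f.getD d.toNat 0)) f

def compute_sum_gcd_power_py_alt (N : Int) (M : Int) (K : Int) : Int :=
  let limit := min N M
  if limit ≤ 0 then 0
  else
    -- f = [0, 1] + [d ** K for d in range(2, limit + 1)]
    let f0 : Array Int := (0 :: 1 :: (PySem.List.pyRange 2 (limit+1) 1).map (fun d => d ^ K.toNat)).toArray
    let f := (PySem.List.pyRange 1 (limit+1) 1).foldl (pvMobiusStepA limit) f0
    ((PySem.List.pyRange 1 (limit+1) 1).map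
      (fun d => f.getD d.toNat 0 * PySem.Int.floordiv N d * PySem.Int.floordiv M d)).sum

-- ===== PRECONDITION & SPEC =====
-- Pre_ excludes negative K with min(N,M) ≥ 2: there Python's `i ** K` yields floats and A
-- returns a float, not a value of the declared int type (for min(N,M) ≤ 1 no power with
-- base ≥ 2 is ever taken in A or B and both return the int N*M; those inputs stay inside).
def Pre_compute_sum_gcd_power_py (N : Int) (M : Int) (K : Int) : Prop := 0 ≤ K ∨ min N M ≤ 1
instance (N : Int) (M : Int) (K : Int) : Decidable (Pre_compute_sum_gcd_power_py N M K) := by unfold Pre_compute_sum_gcd_power_py; infer_instance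
def pvWitness_compute_sum_gcd_power_py : Int × Int × Int := (4, 6, 2)

def Spec_compute_sum_gcd_power_py (N : Int) (M : Int) (K : Int) (out : Int) : Prop := out = compute_sum_gcd_power_py_alt N M K
instance (N : Int) (M : Int) (K : Int) (out : Int) : Decidable (Spec_compute_sum_gcd_power_py N M K out) := by unfold Spec_compute_sum_gcd_power_py; infer_instance

-- ===== CLAIM (what is proved, stated in full; the proofs are below) =====
def Claim_equal_compute_sum_gcd_power_py : Prop := ∀ (N : Int) (M : Int) (K : Int), Dom_compute_sum_gcd_power_py N M K → Pre_compute_sum_gcd_power_py N M K → Spec_compute_sum_gcd_power_py N M K (compute_sum_gcd_power_py N M K)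

-- ===== LEMMAS AND PROOFS =====

-- List-level model of the ports (same steps over List state), used to state the invariants
def pvSieveInner (limit i : Int) (primes g : List Int) (j : Nat)
    (isc : List Bool) (f : List Int) : List Bool × List Int :=
  match hj : primes[j]? with
  | none => (isc, f)
  | some p =>
    let ip := i * p
    if limit < ip then (isc, f)
    else
      let isc' := isc.set ip.toNat true
      if PySem.Int.mod i p == 0 then
        (isc', f.set ip.toNat (f.getD i.toNat 0 * g.getD j 0))
      else
        pvSieveInner limit i primes g (j+1) isc'
          (f.set ip.toNat (f.getD i.toNat 0 * (g.getD j 0 - 1)))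
termination_by primes.length - j
decreasing_by
  have : j < primes.length := List.getElem?_eq_some_iff.mp hj |>.1
  omega

def pvSieveStep (limit K : Int) (st : List Bool × List Int × List Int × List Int)
    (i : Int) : List Bool × List Int × List Int × List Int :=
  let isc := st.1
  let f := st.2.1
  let primes := st.2.2.1
  let g := st.2.2.2
  let fpg :=
    if isc.getD i.toNat false then (f, primes, g)
    else
      let gi := i ^ K.toNat
      (f.set i.toNat (gi - 1), primes ++ [i], g ++ [gi])
  let r := pvSieveInner limit i fpg.2.1 fpg.2.2 0 isc fpg.1
  (r.1, r.2, fpg.2.1, fpg.2.2)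

def pvGroupLoop (N M limit : Int) (f : List Int) : Nat → Int → Int → Int
  | 0, _, ans => ans
  | fuel+1, i, ans =>
    if i ≤ limit then
      let ni := PySem.Int.floordiv N i
      let mi := PySem.Int.floordiv M i
      let nxt := min (PySem.Int.floordiv N ni) (PySem.Int.floordiv M mi)
      let s := f.getD nxt.toNat 0 - f.getD (i-1).toNat 0
      pvGroupLoop N M limit f fuel (nxt+1) (ans + s * ni * mi)
    else ans

def pvMobiusStep (limit : Int) (f : List Int) (d : Int) : List Int :=
  (PySem.List.pyRange (2*d) (limit+1) d).foldl
    (fun f m => f.set m.toNat (f.getD m.toNat 0 - f.getD d.toNat 0)) f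

-- bridges: the Array ports compute the toList image of the List model
theorem pvAGetD {α : Type} (a : Array α) (i : Nat) (d : α) : a.getD i d = a.toList.getD i d := by
  rw [Array.getD_eq_getD_getElem?, List.getD_eq_getElem?_getD, Array.getElem?_toList]

theorem pvFoldl_toList {α β : Type} (stepA : Array α → β → Array α) (stepL : List α → β → List α)
    (h : ∀ a x, (stepA a x).toList = stepL a.toList x) :
    ∀ (l : List β) (a : Array α), (l.foldl stepA a).toList = l.foldl stepL a.toList := by
  intro l
  induction l with
  | nil => intro a; rfl
  | cons x xs ih =>
    intro a
    simp only [List.foldl_cons]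
    rw [ih, h]

theorem pvInnerA_eq (limit i : Int) (primes g : Array Int) :
    ∀ (n j : Nat), primes.size ≤ j + n → ∀ (isc : Array Bool) (f : Array Int),
    ((pvSieveInnerA limit i primes g j isc f).1.toList,
     (pvSieveInnerA limit i primes g j isc f).2.toList)
      = pvSieveInner limit i primes.toList g.toList j isc.toList f.toList := by
  intro n
  induction n with
  | zero =>
    intro j hj isc f
    have hnone : primes[j]? = none := by
      rw [Array.getElem?_eq_none_iff]; omega
    have hnoneL : primes.toList[j]? = none := by
      rw [Array.getElem?_toList]; exact hnone
    rw [pvSieveInnerA.eq_def, pvSieveInner.eq_def, hnone, hnoneL]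
  | succ n ih =>
    intro j hj isc f
    cases hp : primes[j]? with
    | none =>
      have hnoneL : primes.toList[j]? = none := by
        rw [Array.getElem?_toList]; exact hp
      rw [pvSieveInnerA.eq_def, pvSieveInner.eq_def, hp, hnoneL]
    | some p =>
      have hpL : primes.toList[j]? = some p := by
        rw [Array.getElem?_toList]; exact hp
      rw [pvSieveInnerA.eq_def, pvSieveInner.eq_def, hp, hpL]
      simp only
      by_cases hbig : limit < i * p
      · simp only [if_pos hbig]
      · simp only [if_neg hbig]
        by_cases hmod : PySem.Int.mod i p == 0
        · simp only [hmod, if_true, Array.toList_setIfInBounds, pvAGetD,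
            Array.getD_eq_getD_getElem?]
        · simp only [hmod, if_false, Bool.false_eq_true]
          rw [ih (j+1) (by omega)]
          congr 1
          · rw [Array.toList_setIfInBounds]
          · rw [Array.toList_setIfInBounds, pvAGetD, pvAGetD]

theorem pvInnerA_eq' (limit i : Int) (primes g : Array Int) (j : Nat)
    (isc : Array Bool) (f : Array Int) :
    ((pvSieveInnerA limit i primes g j isc f).1.toList,
     (pvSieveInnerA limit i primes g j isc f).2.toList)
      = pvSieveInner limit i primes.toList g.toList j isc.toList f.toList :=
  pvInnerA_eq limit i primes g primes.size j (by omega) isc f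

def pvStToList (st : Array Bool × Array Int × Array Int × Array Int) :
    List Bool × List Int × List Int × List Int :=
  (st.1.toList, st.2.1.toList, st.2.2.1.toList, st.2.2.2.toList)

theorem pvStepA_eq (limit K : Int) (st : Array Bool × Array Int × Array Int × Array Int) (i : Int) :
    pvStToList (pvSieveStepA limit K st i) = pvSieveStep limit K (pvStToList st) i := by
  unfold pvSieveStepA pvSieveStep pvStToList
  simp only
  rw [pvAGetD]
  by_cases hc : st.1.toList.getD i.toNat false
  · simp only [hc, if_true]
    have h := pvInnerA_eq' limit i st.2.2.1 st.2.2.2 0 st.1 st.2.1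
    rw [Prod.ext_iff] at h
    simp only at h
    rw [h.1, h.2]
  · simp only [hc, if_false, Bool.false_eq_true]
    have h := pvInnerA_eq' limit i (st.2.2.1.push i) (st.2.2.2.push (i ^ K.toNat)) 0 st.1
      (st.2.1.setIfInBounds i.toNat (i ^ K.toNat - 1))
    rw [Prod.ext_iff] at h
    simp only at h
    rw [h.1, h.2]
    simp only [Array.toList_push, Array.toList_setIfInBounds]

theorem pvGroupLoopA_eq (N M limit : Int) (f : Array Int) :
    ∀ (fuel : Nat) (i ans : Int),
    pvGroupLoopA N M limit f fuel i ans = pvGroupLoop N M limit f.toList fuel i ans := by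
  intro fuel
  induction fuel with
  | zero => intro i ans; rfl
  | succ fuel ih =>
    intro i ans
    unfold pvGroupLoopA pvGroupLoop
    by_cases hc : i ≤ limit
    · simp only [if_pos hc, pvAGetD, ih]
    · simp only [if_neg hc]

theorem pvMobiusStepA_eq (limit : Int) (f : Array Int) (d : Int) :
    (pvMobiusStepA limit f d).toList = pvMobiusStep limit f.toList d := by
  unfold pvMobiusStepA pvMobiusStep
  exact pvFoldl_toList _ _
    (fun a x => by rw [Array.toList_setIfInBounds, pvAGetD, pvAGetD]) _ f


-- f_K = Id^K ∗ μ, the multiplicative function both programs tabulate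
def pvG (k : ℕ) (x : ℕ) : ℤ :=
  (((ArithmeticFunction.pow k : ArithmeticFunction ℕ) : ArithmeticFunction ℤ) * ArithmeticFunction.moebius) x

theorem pvG_mul' (k : ℕ) :
    (((ArithmeticFunction.pow k : ArithmeticFunction ℕ) : ArithmeticFunction ℤ) * ArithmeticFunction.moebius).IsMultiplicative :=
  (ArithmeticFunction.isMultiplicative_pow (k := k)).natCast (R := ℤ) |>.mul
    ArithmeticFunction.isMultiplicative_moebius

theorem pvG_one (k : ℕ) : pvG k 1 = 1 := (pvG_mul' k).1

theorem pvG_mult (k : ℕ) {a b : ℕ} (h : a.Coprime b) : pvG k (a*b) = pvG k a * pvG k b :=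
  (pvG_mul' k).map_mul_of_coprime h

theorem pvG_sum (k : ℕ) {x : ℕ} (hx : x ≠ 0) : ∑ d ∈ x.divisors, pvG k d = (x:ℤ)^k := by
  have h1 : (((ArithmeticFunction.pow k : ArithmeticFunction ℕ) : ArithmeticFunction ℤ) * ArithmeticFunction.moebius) * ArithmeticFunction.zeta
      = ((ArithmeticFunction.pow k : ArithmeticFunction ℕ) : ArithmeticFunction ℤ) := by
    rw [mul_assoc, ArithmeticFunction.moebius_mul_coe_zeta, mul_one]
  have h2 := congrArg (fun f => f x) h1
  simp only [ArithmeticFunction.coe_mul_zeta_apply] at h2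
  simp only [pvG]
  rw [h2, ArithmeticFunction.natCoe_apply, ArithmeticFunction.pow_apply]
  simp [hx]

theorem pvG_pp_sum (k : ℕ) {p : ℕ} (hp : p.Prime) (a : ℕ) :
    ∑ i ∈ Finset.range (a+1), pvG k (p^i) = (((p:ℤ))^a)^k := by
  have h := pvG_sum k (x := p^a) (pow_ne_zero a hp.pos.ne')
  rw [Nat.sum_divisors_prime_pow hp] at h
  rw [h]; push_cast; ring

theorem pvG_prime_pow (k : ℕ) {p : ℕ} (hp : p.Prime) {a : ℕ} (ha : a ≠ 0) :
    pvG k (p^a) = ((p:ℤ)^a)^k - ((p:ℤ)^(a-1))^k := by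
  obtain ⟨b, rfl⟩ : ∃ b, a = b + 1 := ⟨a - 1, (Nat.succ_pred_eq_of_ne_zero ha).symm⟩
  have h1 := pvG_pp_sum k hp (b+1)
  have h2 := pvG_pp_sum k hp b
  rw [Finset.sum_range_succ] at h1
  simp only [Nat.add_sub_cancel]
  omega

theorem pvG_prime (k : ℕ) {p : ℕ} (hp : p.Prime) : pvG k p = (p:ℤ)^k - 1 := by
  have h := pvG_prime_pow k hp (a := 1) one_ne_zero
  norm_num at h
  exact h


theorem pvG_dvd_mul (k : ℕ) {p i : ℕ} (hp : p.Prime) (hd : p ∣ i) (hi : i ≠ 0) :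
    pvG k (i*p) = pvG k i * (p:ℤ)^k := by
  obtain ⟨a, u, ha, hcop', hsplit⟩ : ∃ a u, 0 < a ∧ ¬ p ∣ u ∧ p^a * u = i :=
    ⟨i.factorization p, i / p ^ i.factorization p,
      Nat.Prime.factorization_pos_of_dvd hp hi hd,
      Nat.not_dvd_ordCompl hp hi, Nat.ordProj_mul_ordCompl_eq_self i p⟩
  have hcop : Nat.Coprime (p^a) u := (hp.coprime_iff_not_dvd.mpr hcop').pow_left _
  have hcop2 : Nat.Coprime (p^(a+1)) u := (hp.coprime_iff_not_dvd.mpr hcop').pow_left _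
  have e1 : pvG k i = pvG k (p^a) * pvG k u := by rw [← hsplit, pvG_mult k hcop]
  have e2 : pvG k (i*p) = pvG k (p^(a+1)) * pvG k u := by
    have : i * p = p^(a+1) * u := by rw [← hsplit]; ring
    rw [this, pvG_mult k hcop2]
  have e3 : pvG k (p^(a+1)) = pvG k (p^a) * (p:ℤ)^k := by
    obtain ⟨b, rfl⟩ : ∃ b, a = b + 1 := ⟨a - 1, (Nat.succ_pred_eq_of_ne_zero ha.ne').symm⟩
    rw [pvG_prime_pow k hp (Nat.succ_ne_zero (b+1)), pvG_prime_pow k hp (Nat.succ_ne_zero b)]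
    norm_num
    have e5 : ((p:ℤ))^(b+1+1) = (p:ℤ)^b * (p:ℤ) * (p:ℤ) := by ring
    have e6 : ((p:ℤ))^(b+1) = (p:ℤ)^b * (p:ℤ) := by ring
    rw [e5, e6]
    ring_nf
    rw [mul_comm ((p:ℤ)^(b*k)) ((p:ℤ)^k)]
  rw [e2, e3, e1]; ring

theorem pvG_not_dvd_mul (k : ℕ) {p i : ℕ} (hp : p.Prime) (hd : ¬ p ∣ i) :
    pvG k (i*p) = pvG k i * ((p:ℤ)^k - 1) := by
  have hcop : Nat.Coprime i p := ((hp.coprime_iff_not_dvd).mpr hd).symm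
  rw [pvG_mult k hcop, pvG_prime k hp]


-- the reference value both ports are proved to compute
def pvRef (k L n m : ℕ) : ℤ := ∑ d ∈ Finset.Icc 1 L, pvG k d * ((n/d : ℕ) : ℤ) * ((m/d : ℕ) : ℤ)

-- characterisations of A's sieve state
def pvMarkedB (i nn : ℕ) : Bool := decide (2 ≤ nn) && !decide nn.Prime && decide (nn / nn.minFac ≤ i)
def pvCovB (i nn : ℕ) : Bool := decide (nn = 1) || (decide nn.Prime && decide (nn ≤ i)) || pvMarkedB i nn
def pvMidB (i nn : ℕ) : Bool := pvCovB (i-1) nn || decide (nn = i)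
def pvTgtB (i L nn : ℕ) : Bool := decide (i ∣ nn) && decide ((nn/i).Prime) && decide (nn/i ≤ i.minFac) && decide (nn ≤ L)
def pvPrimes (i : ℕ) : List ℕ := (List.range (i+1)).filter (fun t => decide t.Prime)
def pvFV (k i nn : ℕ) : ℤ := if pvCovB i nn then pvG k nn else 0

def pvInv (k L i : ℕ) (st : List Bool × List Int × List Int × List Int) : Prop :=
  st.2.2.1 = (pvPrimes i).map (fun (p:ℕ) => (p:ℤ)) ∧
  st.2.2.2 = (pvPrimes i).map (fun (p:ℕ) => ((p:ℤ))^k) ∧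
  st.1.length = L+1 ∧ st.2.1.length = L+1 ∧
  (∀ nn, nn ≤ L → st.1.getD nn false = pvMarkedB i nn) ∧
  (∀ nn, nn ≤ L → st.2.1.getD nn 0 = pvFV k i nn)

theorem pvMinFac_mul {i p : ℕ} (h2 : 2 ≤ i) (hp : p.Prime) (hle : p ≤ i.minFac) :
    (i*p).minFac = p := by
  have hne : i * p ≠ 1 := by
    have := hp.two_le; exact Nat.ne_of_gt (by nlinarith)
  have hd : p ∣ i * p := Dvd.intro i (mul_comm p i ▸ rfl)
  have h1 : (i*p).minFac ≤ p := Nat.minFac_le_of_dvd hp.two_le hd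
  have hq := Nat.minFac_prime hne
  have hdvd := Nat.minFac_dvd (i*p)
  rcases (Nat.Prime.dvd_mul hq).mp hdvd with hdi | hdp
  · have h3 : i.minFac ≤ (i*p).minFac := Nat.minFac_le_of_dvd hq.two_le hdi
    exact le_antisymm h1 (le_trans hle h3)
  · rcases (Nat.Prime.eq_one_or_self_of_dvd hp _ hdp) with h | h
    · exact absurd h hq.ne_one
    · exact h

theorem pvTgt_iff {i L nn : ℕ} (h2 : 2 ≤ i) :
    pvTgtB i L nn = true ↔ ∃ p, p.Prime ∧ p ≤ i.minFac ∧ i*p ≤ L ∧ nn = i*p := by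
  unfold pvTgtB
  simp only [Bool.and_eq_true, decide_eq_true_eq]
  constructor
  · rintro ⟨⟨⟨hdvd, hprime⟩, hle⟩, hnL⟩
    refine ⟨nn / i, hprime, hle, ?_, ?_⟩
    · rw [Nat.mul_div_cancel' hdvd]; omega
    · rw [Nat.mul_div_cancel' hdvd]
  · rintro ⟨p, hprime, hle, hL, rfl⟩
    have : i * p / i = p := Nat.mul_div_cancel_left p (by omega)
    exact ⟨⟨⟨Dvd.intro p (mul_comm i p ▸ rfl), by rw [this]; exact hprime⟩, by rw [this]; exact hle⟩, hL⟩


theorem pvNew_iff {i nn : ℕ} (h2 : 2 ≤ i) :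
    (2 ≤ nn ∧ ¬ nn.Prime ∧ nn / nn.minFac = i) ↔
      (∃ p, p.Prime ∧ p ≤ i.minFac ∧ nn = i*p) := by
  constructor
  · rintro ⟨hn2, hnp, hdivq⟩
    have hne1 : nn ≠ 1 := by omega
    have hpf := Nat.minFac_prime hne1
    have hpd := Nat.minFac_dvd nn
    refine ⟨nn.minFac, hpf, ?_, ?_⟩
    · have hidvd : i ∣ nn := hdivq ▸ Nat.div_dvd_of_dvd hpd
      have h1 : i.minFac ∣ nn := dvd_trans (Nat.minFac_dvd i) hidvd
      exact Nat.minFac_le_of_dvd (Nat.minFac_prime (by omega)).two_le h1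
    · rw [← hdivq, Nat.div_mul_cancel hpd]
  · rintro ⟨p, hp, hle, rfl⟩
    have hmf : (i*p).minFac = p := pvMinFac_mul h2 hp hle
    refine ⟨by nlinarith [hp.two_le], ?_, ?_⟩
    · exact Nat.not_prime_mul (by omega) hp.one_lt.ne'
    · rw [hmf, Nat.mul_div_cancel _ hp.pos]

theorem pvMarkedB_iff {i nn : ℕ} :
    pvMarkedB i nn = true ↔ (2 ≤ nn ∧ ¬ nn.Prime ∧ nn / nn.minFac ≤ i) := by
  unfold pvMarkedB; simp [and_assoc]

theorem pvCovB_iff {i nn : ℕ} :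
    pvCovB i nn = true ↔
      (nn = 1 ∨ (nn.Prime ∧ nn ≤ i) ∨ (2 ≤ nn ∧ ¬ nn.Prime ∧ nn / nn.minFac ≤ i)) := by
  unfold pvCovB pvMarkedB; simp [or_assoc, and_assoc]

theorem pvCovB_succ {i L nn : ℕ} (h2 : 2 ≤ i) (hnn : nn ≤ L) :
    pvCovB i nn = (pvMidB i nn || pvTgtB i L nn) := by
  rw [Bool.eq_iff_iff]
  rw [pvCovB_iff]
  unfold pvMidB
  simp only [Bool.or_eq_true, decide_eq_true_eq, pvCovB_iff, pvTgt_iff h2]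
  constructor
  · rintro (h1 | ⟨hp, hle⟩ | ⟨ha, hb, hc⟩)
    · exact Or.inl (Or.inl (Or.inl h1))
    · rcases Nat.lt_or_ge nn i with h | h
      · exact Or.inl (Or.inl (Or.inr (Or.inl ⟨hp, by omega⟩)))
      · exact Or.inl (Or.inr (by omega))
    · rcases Nat.lt_or_ge (nn / nn.minFac) i with h | h
      · exact Or.inl (Or.inl (Or.inr (Or.inr ⟨ha, hb, by omega⟩)))
      · have heq : nn / nn.minFac = i := by omega
        obtain ⟨p, hp, hle, hnn'⟩ := (pvNew_iff h2).mp ⟨ha, hb, heq⟩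
        exact Or.inr ⟨p, hp, hle, by omega, hnn'⟩
  · rintro (((h1 | ⟨hp, hle⟩ | ⟨ha, hb, hc⟩) | heq) | ⟨p, hp, hle, hL, hnn'⟩)
    · exact Or.inl h1
    · exact Or.inr (Or.inl ⟨hp, by omega⟩)
    · exact Or.inr (Or.inr ⟨ha, hb, by omega⟩)
    · subst heq
      by_cases hp : nn.Prime
      · exact Or.inr (Or.inl ⟨hp, le_refl _⟩)
      · exact Or.inr (Or.inr ⟨h2, hp, Nat.div_le_self _ _⟩)
    · obtain ⟨ha, hb, hc⟩ := (pvNew_iff h2).mpr ⟨p, hp, hle, hnn'⟩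
      exact Or.inr (Or.inr ⟨ha, hb, by omega⟩)

theorem pvMarkedB_succ {i L nn : ℕ} (h2 : 2 ≤ i) (hnn : nn ≤ L) :
    pvMarkedB i nn = (pvMarkedB (i-1) nn || pvTgtB i L nn) := by
  rw [Bool.eq_iff_iff]
  simp only [Bool.or_eq_true, pvMarkedB_iff, pvTgt_iff h2]
  constructor
  · rintro ⟨ha, hb, hc⟩
    rcases Nat.lt_or_ge (nn / nn.minFac) i with h | h
    · exact Or.inl ⟨ha, hb, by omega⟩
    · have heq : nn / nn.minFac = i := by omega
      obtain ⟨p, hp, hle, hnn'⟩ := (pvNew_iff h2).mp ⟨ha, hb, heq⟩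
      exact Or.inr ⟨p, hp, hle, by omega, hnn'⟩
  · rintro (⟨ha, hb, hc⟩ | ⟨p, hp, hle, hL, hnn'⟩)
    · exact ⟨ha, hb, by omega⟩
    · obtain ⟨ha, hb, hc⟩ := (pvNew_iff h2).mpr ⟨p, hp, hle, hnn'⟩
      exact ⟨ha, hb, by omega⟩

theorem pvPrimes_succ (i : ℕ) (h1 : 1 ≤ i) :
    pvPrimes i = pvPrimes (i-1) ++ (if i.Prime then [i] else []) := by
  unfold pvPrimes
  have h : i - 1 + 1 = i := by omega
  rw [h, List.range_succ, List.filter_append]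
  congr 1
  by_cases hp : i.Prime <;> simp [hp]

theorem pvPrimes_sorted (i : ℕ) : (pvPrimes i).Pairwise (· < ·) := by
  exact List.Pairwise.sublist List.filter_sublist List.pairwise_lt_range

theorem pvPrimes_mem {i p : ℕ} : p ∈ pvPrimes i ↔ p.Prime ∧ p ≤ i := by
  unfold pvPrimes
  simp only [List.mem_filter, List.mem_range, decide_eq_true_eq]
  constructor
  · rintro ⟨h1, h2⟩; exact ⟨h2, by omega⟩
  · rintro ⟨h1, h2⟩; exact ⟨by omega, h1⟩

theorem pvInner_none {limit i : Int} {primes g : List Int} {j : Nat} {isc f}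
    (h : primes[j]? = none) : pvSieveInner limit i primes g j isc f = (isc, f) := by
  rw [pvSieveInner.eq_def]
  split
  · rfl
  · rename_i p hp; rw [h] at hp; exact absurd hp (by simp)

theorem pvInner_size {limit i : Int} {primes g : List Int} {j : Nat} {isc f} {p : Int}
    (h : primes[j]? = some p) (hip : limit < i * p) :
    pvSieveInner limit i primes g j isc f = (isc, f) := by
  rw [pvSieveInner.eq_def]
  split
  · rfl
  · rename_i p' hp; rw [h] at hp
    injection hp with hp; subst hp
    simp only [if_pos hip]

theorem pvInner_div {limit i : Int} {primes g : List Int} {j : Nat} {isc f} {p : Int}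
    (h : primes[j]? = some p) (hip : ¬ limit < i * p) (hd : PySem.Int.mod i p == 0) :
    pvSieveInner limit i primes g j isc f =
      (isc.set (i*p).toNat true, f.set (i*p).toNat (f.getD i.toNat 0 * g.getD j 0)) := by
  rw [pvSieveInner.eq_def]
  split
  · rename_i hp; rw [h] at hp; exact absurd hp (by simp)
  · rename_i p' hp; rw [h] at hp
    injection hp with hp; subst hp
    simp only [if_neg hip, if_pos hd]

theorem pvInner_rec {limit i : Int} {primes g : List Int} {j : Nat} {isc f} {p : Int}
    (h : primes[j]? = some p) (hip : ¬ limit < i * p) (hd : ¬ PySem.Int.mod i p == 0) :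
    pvSieveInner limit i primes g j isc f =
      pvSieveInner limit i primes g (j+1) (isc.set (i*p).toNat true)
        (f.set (i*p).toNat (f.getD i.toNat 0 * (g.getD j 0 - 1))) := by
  rw [pvSieveInner.eq_def]
  split
  · rename_i hp; rw [h] at hp; exact absurd hp (by simp)
  · rename_i p' hp; rw [h] at hp
    injection hp with hp; subst hp
    simp only [if_neg hip, if_neg hd]

-- the inner enumerate/break loop applies exactly the updates for primes p ≤ minFac i with i*p ≤ limit
theorem pvInner_spec (k L i : ℕ) (h2 : 2 ≤ i) (hL : i ≤ L) :
    ∀ (suf pre : List ℕ), pvPrimes i = pre ++ suf →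
    (∀ q ∈ pre, q < i.minFac ∧ i * q ≤ L) →
    (∀ q ∈ suf, ∀ q' ∈ pre, q' < q) →
    ∀ isc f, isc.length = L+1 → f.length = L+1 →
    (∀ nn, nn ≤ L → f.getD nn 0 =
      (if (pvMidB i nn || pre.any (fun p => nn == i*p)) then pvG k nn else 0)) →
    (∀ nn, nn ≤ L → isc.getD nn false =
      (pvMarkedB (i-1) nn || pre.any (fun p => nn == i*p))) →
    let r := pvSieveInner (L:ℤ) (i:ℤ) ((pvPrimes i).map (fun (p:ℕ) => (p:ℤ)))
        ((pvPrimes i).map (fun (p:ℕ) => ((p:ℤ))^k)) pre.length isc f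
    r.1.length = L+1 ∧ r.2.length = L+1 ∧
    (∀ nn, nn ≤ L → r.2.getD nn 0 = (if (pvMidB i nn || pvTgtB i L nn) then pvG k nn else 0)) ∧
    (∀ nn, nn ≤ L → r.1.getD nn false = (pvMarkedB (i-1) nn || pvTgtB i L nn)) := by
  intro suf
  induction suf with
  | nil =>
    intro pre hsplit hpre _ isc f hisc hf hfchar hischar
    have hnone : (((pvPrimes i).map (fun (p:ℕ) => (p:ℤ))))[pre.length]? = none := by
      rw [hsplit]
      simp
    intro r
    rw [show r = pvSieveInner (L:ℤ) (i:ℤ) ((pvPrimes i).map (fun (p:ℕ) => (p:ℤ)))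
        ((pvPrimes i).map (fun (p:ℕ) => ((p:ℤ))^k)) pre.length isc f from rfl, pvInner_none hnone]
    have hany : ∀ nn, nn ≤ L → (pre.any (fun p => nn == i*p)) = pvTgtB i L nn := by
      intro nn hnn
      rw [Bool.eq_iff_iff, List.any_eq_true, pvTgt_iff h2]
      constructor
      · rintro ⟨p, hp, heq⟩
        have hpm : p ∈ pvPrimes i := by rw [hsplit]; simpa using hp
        obtain ⟨hprime, _⟩ := pvPrimes_mem.mp hpm
        obtain ⟨hlt, hle⟩ := hpre p hp
        exact ⟨p, hprime, by omega, hle, by simpa using heq⟩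
      · rintro ⟨p, hprime, hle, hL', rfl⟩
        have hpi : p ≤ i := le_trans hle (Nat.minFac_le (by omega))
        have hpm : p ∈ pvPrimes i := pvPrimes_mem.mpr ⟨hprime, hpi⟩
        rw [hsplit] at hpm
        simp only [List.append_nil] at hpm
        exact ⟨p, hpm, by simp⟩
    refine ⟨hisc, hf, ?_, ?_⟩
    · intro nn hnn
      rw [hfchar nn hnn, hany nn hnn]
    · intro nn hnn
      rw [hischar nn hnn, hany nn hnn]
  | cons q rest ih =>
    intro pre hsplit hpre hsort isc f hisc hf hfchar hischar
    have hPW : (pre ++ q :: rest).Pairwise (· < ·) := hsplit ▸ pvPrimes_sorted i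
    have hqm : q ∈ pvPrimes i := by rw [hsplit]; simp
    obtain ⟨hqprime, hqi⟩ := pvPrimes_mem.mp hqm
    have hsome : (((pvPrimes i).map (fun (p:ℕ) => (p:ℤ))))[pre.length]? = some ((q:ℤ)) := by
      rw [hsplit, List.map_append, List.getElem?_append_right (by simp)]
      simp
    have hg : ((pvPrimes i).map (fun (p:ℕ) => ((p:ℤ))^k)).getD pre.length 0 = ((q:ℤ))^k := by
      rw [hsplit, List.map_append, List.getD_eq_getElem?_getD,
        List.getElem?_append_right (by simp)]
      simp
    have hipcast : (i:ℤ) * (q:ℤ) = ((i*q : ℕ) : ℤ) := by push_cast; ring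
    have hrest_gt : ∀ x ∈ rest, q < x := by
      intro x hx
      have := (List.pairwise_append.mp hPW).2.1
      exact (List.pairwise_cons.mp this).1 x hx
    have hpre_lt : ∀ p ∈ pre, p < q := by
      intro p hp
      exact (List.pairwise_append.mp hPW).2.2 p hp q (by simp)
    intro r
    rw [show r = pvSieveInner (L:ℤ) (i:ℤ) ((pvPrimes i).map (fun (p:ℕ) => (p:ℤ)))
        ((pvPrimes i).map (fun (p:ℕ) => ((p:ℤ))^k)) pre.length isc f from rfl]
    rcases Nat.lt_or_ge L (i*q) with hsz | hsz
    · -- size break: no further updates happen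
      rw [pvInner_size hsome (by rw [hipcast]; exact_mod_cast hsz)]
      have hany : ∀ nn, nn ≤ L → (pre.any (fun p => nn == i*p)) = pvTgtB i L nn := by
        intro nn hnn
        rw [Bool.eq_iff_iff, List.any_eq_true, pvTgt_iff h2]
        constructor
        · rintro ⟨p, hp, heq⟩
          have hpm : p ∈ pvPrimes i := by rw [hsplit]; simp [hp]
          obtain ⟨hprime, _⟩ := pvPrimes_mem.mp hpm
          obtain ⟨hlt, hle⟩ := hpre p hp
          exact ⟨p, hprime, by omega, hle, by simpa using heq⟩
        · rintro ⟨p, hprime, hle, hL', rfl⟩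
          have hpi : p ≤ i := le_trans hle (Nat.minFac_le (by omega))
          have hpm : p ∈ pvPrimes i := pvPrimes_mem.mpr ⟨hprime, hpi⟩
          rw [hsplit] at hpm
          rcases List.mem_append.mp hpm with hin | hin
          · exact ⟨p, hin, by simp⟩
          · exfalso
            have hqp : q ≤ p := by
              rcases List.mem_cons.mp hin with rfl | hin'
              · exact le_refl _
              · exact (hrest_gt p hin').le
            have : i * q ≤ i * p := Nat.mul_le_mul_left i hqp
            omega
      refine ⟨hisc, hf, ?_, ?_⟩
      · intro nn hnn; rw [hfchar nn hnn, hany nn hnn]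
      · intro nn hnn; rw [hischar nn hnn, hany nn hnn]
    · -- i*q ≤ L
      have hf_i : f.getD i 0 = pvG k i := by
        rw [hfchar i hL]
        have : pvMidB i i = true := by unfold pvMidB; simp
        rw [this, Bool.true_or, if_pos rfl]
      have hiq0 : i * q ≠ i := by nlinarith [hqprime.two_le]
      have hiqL : i * q ≤ L := hsz
      have hlenf : (i*q) < f.length := by omega
      have hlenisc : (i*q) < isc.length := by omega
      by_cases hdvd : q ∣ i
      · -- q is the least prime factor of i: update and break
        have hqmf : q = i.minFac := by
          have h1' : i.minFac ≤ q := Nat.minFac_le_of_dvd hqprime.two_le hdvd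
          have hmfm : i.minFac ∈ pvPrimes i :=
            pvPrimes_mem.mpr ⟨Nat.minFac_prime (by omega), Nat.minFac_le (by omega)⟩
          rw [hsplit] at hmfm
          rcases List.mem_append.mp hmfm with hin | hin
          · exact absurd h1' (by have := (hpre _ hin).1; omega)
          · rcases List.mem_cons.mp hin with heq | hin'
            · omega
            · have := hrest_gt _ hin'
              omega
        have hmod : (PySem.Int.mod (i:ℤ) (q:ℤ) == 0) = true := by
          rw [PySem.Int.mod_natCast]
          simp only [beq_iff_eq, Int.natCast_eq_zero]
          exact Nat.eq_zero_of_dvd_of_lt hdvd |> fun _ => Nat.mod_eq_zero_of_dvd hdvd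
        rw [pvInner_div hsome (by rw [hipcast]; exact_mod_cast not_lt.mpr hsz) hmod]
        rw [hg, hipcast, Int.toNat_natCast, Int.toNat_natCast, hf_i]
        have hval : pvG k i * (q:ℤ)^k = pvG k (i*q) :=
          (pvG_dvd_mul k hqprime hdvd (by omega)).symm
        have hany : ∀ nn, nn ≤ L → (pvTgtB i L nn) = (pre.any (fun p => nn == i*p) || decide (nn = i*q)) := by
          intro nn hnn
          rw [Bool.eq_iff_iff, pvTgt_iff h2]
          simp only [Bool.or_eq_true, List.any_eq_true, beq_iff_eq, decide_eq_true_eq]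
          constructor
          · rintro ⟨p, hprime, hle, hL', rfl⟩
            have hpi : p ≤ i := le_trans hle (Nat.minFac_le (by omega))
            have hpm : p ∈ pvPrimes i := pvPrimes_mem.mpr ⟨hprime, hpi⟩
            rw [hsplit] at hpm
            rcases List.mem_append.mp hpm with hin | hin
            · exact Or.inl ⟨p, hin, rfl⟩
            · rcases List.mem_cons.mp hin with rfl | hin'
              · exact Or.inr rfl
              · exfalso
                have := hrest_gt _ hin'
                omega
          · rintro (⟨p, hp, rfl⟩ | rfl)
            · have hpm : p ∈ pvPrimes i := by rw [hsplit]; simp [hp]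
              obtain ⟨hprime, _⟩ := pvPrimes_mem.mp hpm
              obtain ⟨hlt, hle⟩ := hpre p hp
              exact ⟨p, hprime, by omega, hle, rfl⟩
            · exact ⟨q, hqprime, by omega, hiqL, rfl⟩
        refine ⟨by simpa using hisc, by simpa using hf, ?_, ?_⟩
        · intro nn hnn
          rw [hany nn hnn]
          by_cases hnq : nn = i*q
          · subst hnq
            rw [List.getD_eq_getElem?_getD, List.getElem?_set_self hlenf]
            simp only [Option.getD_some]
            rw [hval]
            simp
          · have hne : i*q ≠ nn := fun h => hnq h.symm
            rw [List.getD_eq_getElem?_getD, List.getElem?_set_ne hne, ← List.getD_eq_getElem?_getD,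
              hfchar nn hnn]
            have : decide (nn = i*q) = false := by simp [hnq]
            rw [this, Bool.or_false]
        · intro nn hnn
          rw [hany nn hnn]
          by_cases hnq : nn = i*q
          · subst hnq
            rw [List.getD_eq_getElem?_getD, List.getElem?_set_self hlenisc]
            simp
          · have hne : i*q ≠ nn := fun h => hnq h.symm
            rw [List.getD_eq_getElem?_getD, List.getElem?_set_ne hne, ← List.getD_eq_getElem?_getD,
              hischar nn hnn]
            have : decide (nn = i*q) = false := by simp [hnq]
            rw [this, Bool.or_false]
      · -- q does not divide i: update and continue
        have hqlt : q < i.minFac := by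
          have h1' : q ≤ i.minFac := by
            by_contra hgt
            push Not at hgt
            have hmfm : i.minFac ∈ pvPrimes i :=
              pvPrimes_mem.mpr ⟨Nat.minFac_prime (by omega), Nat.minFac_le (by omega)⟩
            rw [hsplit] at hmfm
            rcases List.mem_append.mp hmfm with hin | hin
            · have := (hpre _ hin).1; omega
            · rcases List.mem_cons.mp hin with heq | hin'
              · exact hdvd (heq ▸ Nat.minFac_dvd i)
              · have := hrest_gt _ hin'; omega
          rcases Nat.lt_or_ge q i.minFac with h | h
          · exact h
          · have : q = i.minFac := by omega
            exact absurd (this ▸ Nat.minFac_dvd i) hdvd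
        have hmod : ¬ ((PySem.Int.mod (i:ℤ) (q:ℤ) == 0) = true) := by
          intro h
          rw [PySem.Int.mod_natCast] at h
          have h0 : (i % q : ℕ) = 0 := by exact_mod_cast (beq_iff_eq.mp h)
          exact hdvd (Nat.dvd_of_mod_eq_zero h0)
        rw [pvInner_rec hsome (by rw [hipcast]; exact_mod_cast not_lt.mpr hsz) (by simpa using hmod)]
        rw [hg, hipcast, Int.toNat_natCast, Int.toNat_natCast, hf_i]
        have hval : pvG k i * ((q:ℤ)^k - 1) = pvG k (i*q) :=
          (pvG_not_dvd_mul k hqprime hdvd).symm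
        have happly := ih (pre ++ [q]) (by rw [hsplit]; simp)
          (by
            intro x hx
            rcases List.mem_append.mp hx with hin | hin
            · exact hpre x hin
            · rcases List.mem_singleton.mp hin with rfl
              exact ⟨hqlt, hiqL⟩)
          (by
            intro x hx p hp
            rcases List.mem_append.mp hp with hin | hin
            · exact lt_trans (hpre_lt p hin) (hrest_gt x hx)
            · rcases List.mem_singleton.mp hin with rfl
              exact hrest_gt x hx)
          (isc.set (i*q) true) (f.set (i*q) (pvG k i * ((q:ℤ)^k - 1)))
          (by simpa using hisc) (by simpa using hf)
          (by
            intro nn hnn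
            by_cases hnq : nn = i*q
            · subst hnq
              rw [List.getD_eq_getElem?_getD, List.getElem?_set_self hlenf]
              simp only [Option.getD_some]
              rw [hval]
              have : ((pre ++ [q]).any (fun p => i*q == i*p)) = true := by
                simp
              rw [this, Bool.or_true, if_pos rfl]
            · have hne : i*q ≠ nn := fun h => hnq h.symm
              rw [List.getD_eq_getElem?_getD, List.getElem?_set_ne hne, ← List.getD_eq_getElem?_getD,
                hfchar nn hnn]
              have : ((pre ++ [q]).any (fun p => nn == i*p)) = (pre.any (fun p => nn == i*p)) := by
                simp [List.any_append, hnq]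
              rw [this])
          (by
            intro nn hnn
            by_cases hnq : nn = i*q
            · subst hnq
              rw [List.getD_eq_getElem?_getD, List.getElem?_set_self hlenisc]
              have : ((pre ++ [q]).any (fun p => i*q == i*p)) = true := by simp
              rw [this, Bool.or_true]
              rfl
            · have hne : i*q ≠ nn := fun h => hnq h.symm
              rw [List.getD_eq_getElem?_getD, List.getElem?_set_ne hne, ← List.getD_eq_getElem?_getD,
                hischar nn hnn]
              have : ((pre ++ [q]).any (fun p => nn == i*p)) = (pre.any (fun p => nn == i*p)) := by
                simp [List.any_append, hnq]
              rw [this])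
        rw [show (pre ++ [q]).length = pre.length + 1 by simp] at happly
        exact happly

theorem pvCovB_zero (i : ℕ) : pvCovB i 0 = false := by
  unfold pvCovB pvMarkedB
  simp [Nat.not_prime_zero]

theorem pvSieveStep_eq (limit K : Int) (st : List Bool × List Int × List Int × List Int) (i : Int) :
    pvSieveStep limit K st i =
      (if st.1.getD i.toNat false then
        ((pvSieveInner limit i st.2.2.1 st.2.2.2 0 st.1 st.2.1).1,
         (pvSieveInner limit i st.2.2.1 st.2.2.2 0 st.1 st.2.1).2, st.2.2.1, st.2.2.2)
       else
        ((pvSieveInner limit i (st.2.2.1 ++ [i]) (st.2.2.2 ++ [i ^ K.toNat]) 0 st.1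
            (st.2.1.set i.toNat (i ^ K.toNat - 1))).1,
         (pvSieveInner limit i (st.2.2.1 ++ [i]) (st.2.2.2 ++ [i ^ K.toNat]) 0 st.1
            (st.2.1.set i.toNat (i ^ K.toNat - 1))).2,
         st.2.2.1 ++ [i], st.2.2.2 ++ [i ^ K.toNat])) := by
  unfold pvSieveStep
  by_cases h : st.1[i.toNat]?.getD false = true <;> simp [h]

theorem pvStep_spec (k L i : ℕ) (h2 : 2 ≤ i) (hL : i ≤ L) (K : Int) (hK : K.toNat = k)
    (st : List Bool × List Int × List Int × List Int) (hst : pvInv k L (i-1) st) :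
    pvInv k L i (pvSieveStep (L:ℤ) K st (i:ℤ)) := by
  obtain ⟨hpv, hgv, hlisc, hlf, hiscC, hfC⟩ := hst
  have hti : ((i:ℤ)).toNat = i := Int.toNat_natCast i
  have hcond : st.1.getD ((i:ℤ)).toNat false = pvMarkedB (i-1) i := by
    rw [hti]; exact hiscC i hL
  by_cases hprime : i.Prime
  · -- i is prime: a new prime is appended and f[i] := i^K - 1
    have hm : pvMarkedB (i-1) i = false := by
      unfold pvMarkedB; simp [hprime]
    have hprimesi : pvPrimes i = pvPrimes (i-1) ++ [i] := by
      rw [pvPrimes_succ i (by omega)]; simp [hprime]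
    have hpe : st.2.2.1 ++ [(i:ℤ)] = (pvPrimes i).map (fun (p:ℕ) => (p:ℤ)) := by
      rw [hpv, hprimesi]; simp
    have hge : st.2.2.2 ++ [(i:ℤ)^k] = (pvPrimes i).map (fun (p:ℕ) => ((p:ℤ))^k) := by
      rw [hgv, hprimesi]; simp
    have hstep : pvSieveStep (L:ℤ) K st (i:ℤ) =
        ((pvSieveInner (L:ℤ) (i:ℤ) ((pvPrimes i).map (fun (p:ℕ) => (p:ℤ)))
            ((pvPrimes i).map (fun (p:ℕ) => ((p:ℤ))^k)) 0 st.1 (st.2.1.set i ((i:ℤ)^k - 1))).1,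
         (pvSieveInner (L:ℤ) (i:ℤ) ((pvPrimes i).map (fun (p:ℕ) => (p:ℤ)))
            ((pvPrimes i).map (fun (p:ℕ) => ((p:ℤ))^k)) 0 st.1 (st.2.1.set i ((i:ℤ)^k - 1))).2,
         (pvPrimes i).map (fun (p:ℕ) => (p:ℤ)), (pvPrimes i).map (fun (p:ℕ) => ((p:ℤ))^k)) := by
      rw [pvSieveStep_eq, hcond, hm]
      simp only [Bool.false_eq_true, if_false, hti, hK, hpe, hge]
    rw [hstep]
    have hfi : pvG k i = (i:ℤ)^k - 1 := pvG_prime k hprime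
    have hlf' : (st.2.1.set i ((i:ℤ)^k - 1)).length = L+1 := by simpa using hlf
    have hfchar : ∀ nn, nn ≤ L → (st.2.1.set i ((i:ℤ)^k - 1)).getD nn 0 =
        (if (pvMidB i nn || ([] : List ℕ).any (fun p => nn == i*p)) then pvG k nn else 0) := by
      intro nn hnn
      simp only [List.any_nil, Bool.or_false]
      by_cases hni : nn = i
      · subst hni
        rw [List.getD_eq_getElem?_getD, List.getElem?_set_self (by omega), Option.getD_some]
        have : pvMidB nn nn = true := by unfold pvMidB; simp
        rw [this, if_pos rfl, hfi]
      · have hne : i ≠ nn := fun h => hni h.symm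
        rw [List.getD_eq_getElem?_getD, List.getElem?_set_ne hne, ← List.getD_eq_getElem?_getD,
          hfC nn hnn]
        unfold pvFV pvMidB
        have : decide (nn = i) = false := by simp [hni]
        rw [this, Bool.or_false]
    have hischar : ∀ nn, nn ≤ L → st.1.getD nn false =
        (pvMarkedB (i-1) nn || ([] : List ℕ).any (fun p => nn == i*p)) := by
      intro nn hnn
      simp only [List.any_nil, Bool.or_false]
      exact hiscC nn hnn
    have happ := pvInner_spec k L i h2 hL (pvPrimes i) [] (by simp) (by simp) (by simp)
      st.1 (st.2.1.set i ((i:ℤ)^k - 1)) hlisc hlf' hfchar hischar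
    simp only [List.length_nil] at happ
    obtain ⟨hl1, hl2, hc2, hc1⟩ := happ
    refine ⟨rfl, rfl, hl1, hl2, ?_, ?_⟩
    · intro nn hnn
      rw [hc1 nn hnn, ← pvMarkedB_succ h2 hnn]
    · intro nn hnn
      rw [hc2 nn hnn, ← pvCovB_succ h2 hnn]
      rfl
  · -- i is composite: it is already marked, so nothing is appended
    have hm : pvMarkedB (i-1) i = true := by
      rw [pvMarkedB_iff]
      refine ⟨h2, hprime, ?_⟩
      have hmf2 : 2 ≤ i.minFac := (Nat.minFac_prime (by omega)).two_le
      have : i / i.minFac ≤ i / 2 := Nat.div_le_div_left hmf2 (by omega)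
      have : i / 2 ≤ i - 1 := by omega
      omega
    have hprimesi : pvPrimes i = pvPrimes (i-1) := by
      rw [pvPrimes_succ i (by omega)]; simp [hprime]
    have hstep : pvSieveStep (L:ℤ) K st (i:ℤ) =
        ((pvSieveInner (L:ℤ) (i:ℤ) st.2.2.1 st.2.2.2 0 st.1 st.2.1).1,
         (pvSieveInner (L:ℤ) (i:ℤ) st.2.2.1 st.2.2.2 0 st.1 st.2.1).2,
         st.2.2.1, st.2.2.2) := by
      rw [pvSieveStep_eq, hcond, hm]
      simp only [if_true]
    rw [hstep]
    have hfchar : ∀ nn, nn ≤ L → st.2.1.getD nn 0 =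
        (if (pvMidB i nn || ([] : List ℕ).any (fun p => nn == i*p)) then pvG k nn else 0) := by
      intro nn hnn
      simp only [List.any_nil, Bool.or_false]
      rw [hfC nn hnn]
      unfold pvFV pvMidB
      by_cases hni : nn = i
      · subst hni
        have hcov : pvCovB (nn-1) nn = true := by
          rw [pvCovB_iff]
          exact Or.inr (Or.inr (pvMarkedB_iff.mp hm))
        rw [hcov]
        simp
      · have : decide (nn = i) = false := by simp [hni]
        rw [this, Bool.or_false]
    have hischar : ∀ nn, nn ≤ L → st.1.getD nn false =
        (pvMarkedB (i-1) nn || ([] : List ℕ).any (fun p => nn == i*p)) := by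
      intro nn hnn
      simp only [List.any_nil, Bool.or_false]
      exact hiscC nn hnn
    have hpv' : st.2.2.1 = (pvPrimes i).map (fun (p:ℕ) => (p:ℤ)) := by rw [hpv, hprimesi]
    have hgv' : st.2.2.2 = (pvPrimes i).map (fun (p:ℕ) => ((p:ℤ))^k) := by rw [hgv, hprimesi]
    rw [hpv', hgv']
    have happ := pvInner_spec k L i h2 hL (pvPrimes i) [] (by simp) (by simp) (by simp)
      st.1 st.2.1 hlisc hlf hfchar hischar
    simp only [List.length_nil] at happ
    obtain ⟨hl1, hl2, hc2, hc1⟩ := happ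
    refine ⟨rfl, rfl, hl1, hl2, ?_, ?_⟩
    · intro nn hnn
      rw [hc1 nn hnn, ← pvMarkedB_succ h2 hnn]
    · intro nn hnn
      rw [hc2 nn hnn, ← pvCovB_succ h2 hnn]
      rfl

theorem pvMarkedB_zero_one {i nn : ℕ} (hi : i ≤ 1) : pvMarkedB i nn = false := by
  rw [Bool.eq_false_iff]
  intro h
  obtain ⟨h2, hnp, hdiv⟩ := pvMarkedB_iff.mp h
  have hsq := Nat.minFac_sq_le_self (by omega) hnp
  have hmf : 2 ≤ nn.minFac := (Nat.minFac_prime (by omega)).two_le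
  have : nn.minFac ≤ nn / nn.minFac := (Nat.le_div_iff_mul_le (by omega)).mpr (by nlinarith)
  omega

theorem pvInv_init (k L : ℕ) (h1 : 1 ≤ L) :
    pvInv k L 1 (List.replicate (L+1) false, (List.replicate (L+1) (0:ℤ)).set 1 1, [], []) := by
  refine ⟨by simp [show pvPrimes 1 = [] from by decide], by simp [show pvPrimes 1 = [] from by decide], by simp, by simp, ?_, ?_⟩
  · intro nn hnn
    rw [List.getD_replicate _ (by omega), pvMarkedB_zero_one le_rfl]
  · intro nn hnn
    unfold pvFV pvCovB
    rw [pvMarkedB_zero_one le_rfl]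
    by_cases hnn1 : nn = 1
    · subst hnn1
      rw [pvG_one]
      have : ((List.replicate (L+1) (0:ℤ)).set 1 1).getD 1 0 = 1 := by
        rw [List.getD_eq_getElem?_getD, List.getElem?_set_self (by simp; omega)]
        rfl
      rw [this]
      simp
    · have hne : (1:ℕ) ≠ nn := fun h => hnn1 h.symm
      have h0 : ((List.replicate (L+1) (0:ℤ)).set 1 1).getD nn 0 = 0 := by
        rw [List.getD_eq_getElem?_getD, List.getElem?_set_ne hne]
        rcases Nat.lt_or_ge nn (L+1) with h | h
        · simp [List.getElem?_replicate, h]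
        · rw [List.getElem?_eq_none (by simpa using h)]; rfl
      rw [h0]
      have hnp : ¬ (nn.Prime ∧ nn ≤ 1) := by
        rintro ⟨hp, hle⟩
        have := hp.two_le
        omega
      have : (decide (nn = 1) || (decide nn.Prime && decide (nn ≤ 1)) || false) = false := by
        simp [hnn1]
        intro hp
        have := hp.two_le
        omega
      rw [this]
      simp

theorem pvFold_spec (k L : ℕ) (h1 : 1 ≤ L) (K : Int) (hK : K.toNat = k) :
    ∀ i, 1 ≤ i → i ≤ L →
    pvInv k L i ((PySem.List.pyRange 2 ((i:ℤ)+1) 1).foldl (pvSieveStep (L:ℤ) K)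
      (List.replicate (L+1) false, (List.replicate (L+1) (0:ℤ)).set 1 1, [], [])) := by
  intro i
  induction i with
  | zero => intro h; omega
  | succ t ih =>
    intro _ hle
    rcases Nat.eq_zero_or_pos t with rfl | ht
    · have hr : PySem.List.pyRange 2 (((0+1:ℕ):ℤ)+1) 1 = [] := by
        rw [PySem.List.pyRange_one_eq_nil (by norm_num)]
      rw [hr]
      simpa using pvInv_init k L h1
    · have hr : PySem.List.pyRange 2 ((((t+1:ℕ)):ℤ)+1) 1
          = PySem.List.pyRange 2 ((t:ℤ)+1) 1 ++ [(t:ℤ)+1] := by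
        have := PySem.List.pyRange_one_succ_right (a := 2) (b := (t:ℤ)+1) (by push_cast; omega)
        push_cast
        rw [this]
      rw [hr, List.foldl_append]
      simp only [List.foldl_cons, List.foldl_nil]
      have hinv := ih ht (by omega)
      have hcast : ((t:ℤ)+1) = (((t+1:ℕ)):ℤ) := by push_cast; ring
      rw [hcast]
      exact pvStep_spec k L (t+1) (by omega) hle K hK _ (by simpa using hinv)

theorem pvCovB_top {L nn : ℕ} (h1 : 1 ≤ nn) (hL : nn ≤ L) : pvCovB L nn = true := by
  rw [pvCovB_iff]
  rcases Nat.lt_or_ge nn 2 with h | h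
  · exact Or.inl (by omega)
  · by_cases hp : nn.Prime
    · exact Or.inr (Or.inl ⟨hp, hL⟩)
    · exact Or.inr (Or.inr ⟨h, hp, le_trans (Nat.div_le_self _ _) hL⟩)

-- the prefix-sum pass
theorem pvPrefix_spec (k L : ℕ) (h1 : 1 ≤ L) (f : List ℤ) (hf : f.length = L+1)
    (hchar : ∀ nn, nn ≤ L → f.getD nn 0 = (if 1 ≤ nn then pvG k nn else 0)) :
    ∀ i, i ≤ L →
    let f1 := (PySem.List.pyRange 1 ((i:ℤ)+1) 1).foldl
      (fun f j => f.set j.toNat (f.getD j.toNat 0 + f.getD (j-1).toNat 0)) f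
    f1.length = L+1 ∧
    (∀ nn, nn ≤ L → f1.getD nn 0 =
      (if 1 ≤ nn ∧ nn ≤ i then ∑ d ∈ Finset.Icc 1 nn, pvG k d else (if 1 ≤ nn then pvG k nn else 0))) := by
  intro i
  induction i with
  | zero =>
    intro _
    have hr : PySem.List.pyRange 1 (((0:ℕ):ℤ)+1) 1 = [] := by
      rw [show ((0:ℕ):ℤ) + 1 = 1 by norm_num, PySem.List.pyRange_of_pos _ _ one_pos]
      simp
    rw [hr]
    simp only [List.foldl_nil]
    refine ⟨hf, ?_⟩
    intro nn hnn
    rw [if_neg (by omega), hchar nn hnn]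
  | succ i ih =>
    intro hle
    obtain ⟨ihl, ihc⟩ := ih (by omega)
    set f1 := (PySem.List.pyRange 1 ((i:ℤ)+1) 1).foldl
      (fun f j => f.set j.toNat (f.getD j.toNat 0 + f.getD (j-1).toNat 0)) f with hf1
    have hr : PySem.List.pyRange 1 ((((i+1:ℕ)):ℤ)+1) 1 = PySem.List.pyRange 1 ((i:ℤ)+1) 1 ++ [(i:ℤ)+1] := by
      have := PySem.List.pyRange_one_succ_right (a := 1) (b := (i:ℤ)+1) (by omega)
      push_cast
      rw [this]
    rw [hr, List.foldl_append, ← hf1]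
    simp only [List.foldl_cons, List.foldl_nil]
    have ht1 : ((i:ℤ)+1).toNat = i+1 := by omega
    have ht2 : ((i:ℤ)+1-1).toNat = i := by omega
    rw [ht1, ht2]
    have hsum_i : f1.getD i 0 = ∑ d ∈ Finset.Icc 1 i, pvG k d := by
      rcases Nat.eq_zero_or_pos i with h0 | h0
      · subst h0
        rw [ihc 0 (by omega), if_neg (by omega), if_neg (by omega)]
        simp
      · rw [ihc i (by omega), if_pos (by omega)]
    have hval : f1.getD (i+1) 0 = pvG k (i+1) := by
      rw [ihc (i+1) (by omega), if_neg (by omega), if_pos (by omega)]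
    constructor
    · rw [List.length_set, ihl]
    · intro nn hnn
      by_cases hni : nn = i+1
      · subst hni
        have hlt : i+1 < f1.length := by rw [ihl]; omega
        rw [List.getD_eq_getElem?_getD, List.getElem?_set_self hlt]
        simp only [Option.getD_some]
        rw [hval, hsum_i, if_pos (by omega), Finset.sum_Icc_succ_top (by omega)]
        ring
      · have hne : i+1 ≠ nn := fun h => hni h.symm
        rw [List.getD_eq_getElem?_getD, List.getElem?_set_ne hne, ← List.getD_eq_getElem?_getD, ihc nn hnn]
        by_cases hc : 1 ≤ nn ∧ nn ≤ i
        · rw [if_pos hc, if_pos (by omega)]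
        · rw [if_neg hc]
          by_cases hz : 1 ≤ nn
          · rw [if_pos hz, if_neg (by omega : ¬(1 ≤ nn ∧ nn ≤ i+1))]
          · rw [if_neg hz, if_neg (by omega : ¬(1 ≤ nn ∧ nn ≤ i+1))]

-- the grouping while-loop
theorem pvGroup_spec (k L n m : ℕ) (hL : L = min n m) (h1 : 1 ≤ L) (f : List ℤ)
    (hf : ∀ nn, nn ≤ L → f.getD nn 0 = ∑ d ∈ Finset.Icc 1 nn, pvG k d) :
    ∀ fuel i, 1 ≤ i → L + 1 - i ≤ fuel → ∀ ans,
    pvGroupLoop (n:ℤ) (m:ℤ) (L:ℤ) f fuel (i:ℤ) ans =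
      ans + ∑ d ∈ Finset.Icc i L, pvG k d * ((n/d : ℕ) : ℤ) * ((m/d : ℕ) : ℤ) := by
  intro fuel
  induction fuel with
  | zero =>
    intro i h1 hfuel ans
    have hiL : L < i := by omega
    rw [show pvGroupLoop (n:ℤ) (m:ℤ) (L:ℤ) f 0 (i:ℤ) ans = ans from rfl]
    rw [Finset.Icc_eq_empty (by omega), Finset.sum_empty, add_zero]
  | succ fuel ih =>
    intro i h1 hfuel ans
    rcases Nat.lt_or_ge L i with hiL | hiL
    · have hg : ¬ ((i:ℤ) ≤ (L:ℤ)) := by push_cast; omega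
      rw [show pvGroupLoop (n:ℤ) (m:ℤ) (L:ℤ) f (fuel+1) (i:ℤ) ans
          = if (i:ℤ) ≤ (L:ℤ) then _ else ans from rfl, if_neg hg,
        Finset.Icc_eq_empty (by omega), Finset.sum_empty, add_zero]
    · -- i ≤ L
      have hin : i ≤ n := by omega
      have him : i ≤ m := by omega
      set q1 := n / i with hq1
      set q2 := m / i with hq2
      have hq1p : 1 ≤ q1 := (Nat.one_le_div_iff (by omega)).mpr hin
      have hq2p : 1 ≤ q2 := (Nat.one_le_div_iff (by omega)).mpr him
      set nxt := min (n / q1) (m / q2) with hnxt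
      have hinxt : i ≤ nxt := by
        refine le_min ?_ ?_
        · exact (Nat.le_div_iff_mul_le (by omega)).mpr
            (le_trans (Nat.mul_le_mul_left i (le_refl q1)) (by rw [mul_comm]; exact Nat.div_mul_le_self n i))
        · exact (Nat.le_div_iff_mul_le (by omega)).mpr
            (le_trans (Nat.mul_le_mul_left i (le_refl q2)) (by rw [mul_comm]; exact Nat.div_mul_le_self m i))
      have hnxtL : nxt ≤ L := by
        have h1' : n / q1 ≤ n := Nat.div_le_self _ _
        have h2' : m / q2 ≤ m := Nat.div_le_self _ _
        have := min_le_left (n / q1) (m / q2)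
        have := min_le_right (n / q1) (m / q2)
        omega
      have hconstn : ∀ d, i ≤ d → d ≤ nxt → n / d = q1 := by
        intro d hd1 hd2
        have hup : n / d ≤ q1 := Nat.div_le_div_left hd1 (by omega)
        have hdn : q1 ≤ n / d := by
          refine (Nat.le_div_iff_mul_le (by omega)).mpr ?_
          have hd3 : d ≤ n / q1 := le_trans hd2 (min_le_left _ _)
          calc q1 * d ≤ q1 * (n / q1) := Nat.mul_le_mul_left _ hd3
            _ ≤ n := by rw [mul_comm]; exact Nat.div_mul_le_self _ _
        omega
      have hconstm : ∀ d, i ≤ d → d ≤ nxt → m / d = q2 := by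
        intro d hd1 hd2
        have hup : m / d ≤ q2 := Nat.div_le_div_left hd1 (by omega)
        have hdn : q2 ≤ m / d := by
          refine (Nat.le_div_iff_mul_le (by omega)).mpr ?_
          have hd3 : d ≤ m / q2 := le_trans hd2 (min_le_right _ _)
          calc q2 * d ≤ q2 * (m / q2) := Nat.mul_le_mul_left _ hd3
            _ ≤ m := by rw [mul_comm]; exact Nat.div_mul_le_self _ _
        omega
      -- unfold one iteration
      have hg : ((i:ℤ) ≤ (L:ℤ)) := by push_cast; omega
      rw [show pvGroupLoop (n:ℤ) (m:ℤ) (L:ℤ) f (fuel+1) (i:ℤ) ans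
          = if (i:ℤ) ≤ (L:ℤ) then
              pvGroupLoop (n:ℤ) (m:ℤ) (L:ℤ) f fuel
                ((min (PySem.Int.floordiv (n:ℤ) (PySem.Int.floordiv (n:ℤ) (i:ℤ))) (PySem.Int.floordiv (m:ℤ) (PySem.Int.floordiv (m:ℤ) (i:ℤ))))+1)
                (ans + (f.getD (min (PySem.Int.floordiv (n:ℤ) (PySem.Int.floordiv (n:ℤ) (i:ℤ))) (PySem.Int.floordiv (m:ℤ) (PySem.Int.floordiv (m:ℤ) (i:ℤ)))).toNat 0
                  - f.getD ((i:ℤ)-1).toNat 0) * PySem.Int.floordiv (n:ℤ) (i:ℤ) * PySem.Int.floordiv (m:ℤ) (i:ℤ))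
            else ans from rfl, if_pos hg]
      rw [PySem.Int.floordiv_natCast n i, PySem.Int.floordiv_natCast m i]
      rw [PySem.Int.floordiv_natCast n q1, PySem.Int.floordiv_natCast m q2]
      rw [← Nat.cast_min, Int.toNat_natCast]
      have hc1 : ((min (n/q1) (m/q2) : ℕ) : ℤ) + 1 = ((nxt + 1 : ℕ) : ℤ) := by
        rw [← hnxt]; push_cast; ring
      rw [hc1]
      have ht2 : ((i:ℤ)-1).toNat = i-1 := by omega
      rw [ht2]
      rw [ih (nxt+1) (by omega) (by omega)]
      rw [hf _ (by rw [← hnxt]; omega), hf (i-1) (by omega)]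
      -- sum over the block
      have hIoc1 : ∑ d ∈ Finset.Icc 1 nxt, pvG k d - ∑ d ∈ Finset.Icc 1 (i-1), pvG k d
          = ∑ d ∈ Finset.Ioc (i-1) nxt, pvG k d := by
        have := Finset.sum_Ioc_consecutive (fun d => pvG k d) (by omega : 0 ≤ i-1) (by omega : i-1 ≤ nxt)
        have e1 : Finset.Ioc 0 (i-1) = Finset.Icc 1 (i-1) := by
          ext x; simp only [Finset.mem_Ioc, Finset.mem_Icc]; omega
        have e2 : Finset.Ioc 0 nxt = Finset.Icc 1 nxt := by
          ext x; simp only [Finset.mem_Ioc, Finset.mem_Icc]; omega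
        rw [e1, e2] at this
        linarith
      have hsplit : ∑ d ∈ Finset.Icc i L, pvG k d * ((n/d : ℕ) : ℤ) * ((m/d : ℕ) : ℤ)
          = ∑ d ∈ Finset.Ioc (i-1) nxt, pvG k d * ((n/d : ℕ) : ℤ) * ((m/d : ℕ) : ℤ)
            + ∑ d ∈ Finset.Icc (nxt+1) L, pvG k d * ((n/d : ℕ) : ℤ) * ((m/d : ℕ) : ℤ) := by
        have := Finset.sum_Ioc_consecutive
          (fun d => pvG k d * ((n/d : ℕ) : ℤ) * ((m/d : ℕ) : ℤ))
          (by omega : i-1 ≤ nxt) (by omega : nxt ≤ L)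
        have e1 : Finset.Ioc (i-1) L = Finset.Icc i L := by
          ext x; simp only [Finset.mem_Ioc, Finset.mem_Icc]; omega
        have e2 : Finset.Ioc nxt L = Finset.Icc (nxt+1) L := by
          ext x; simp only [Finset.mem_Ioc, Finset.mem_Icc]; omega
        rw [e1, e2] at this
        linarith
      have hblock : ∑ d ∈ Finset.Ioc (i-1) nxt, pvG k d * ((n/d : ℕ) : ℤ) * ((m/d : ℕ) : ℤ)
          = (∑ d ∈ Finset.Ioc (i-1) nxt, pvG k d) * ((q1:ℕ) : ℤ) * ((q2:ℕ) : ℤ) := by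
        rw [Finset.sum_mul, Finset.sum_mul]
        refine Finset.sum_congr rfl ?_
        intro d hd
        obtain ⟨hd1, hd2⟩ := Finset.mem_Ioc.mp hd
        rw [hconstn d (by omega) hd2, hconstm d (by omega) hd2]
      rw [hsplit, hblock, hIoc1, ← hq1, ← hq2]
      ring


theorem pvRange_nodup (a b s : Int) (hs : 0 < s) : (PySem.List.pyRange a b s).Nodup := by
  rw [PySem.List.pyRange_of_pos a b hs]
  refine List.Nodup.map ?_ List.nodup_range
  intro x y h
  simp only at h
  have h2 : s * (x:ℤ) = s * y := by linarith
  exact_mod_cast mul_left_cancel₀ hs.ne' h2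

theorem pvRange1 (L : ℕ) : PySem.List.pyRange 1 ((L:ℤ)+1) 1 = (List.range L).map (fun (j:ℕ) => (j:ℤ) + 1) := by
  rw [PySem.List.pyRange_of_pos _ _ one_pos]
  have h1 : (((L:ℤ)+1) - 1 + 1 - 1) / 1 = (L:ℤ) := by norm_num
  rcases Nat.eq_zero_or_pos L with h | h
  · subst h; norm_num
  · rw [if_pos (by push_cast; omega), h1, Int.toNat_natCast]
    refine List.map_congr_left ?_
    intro j _
    push_cast
    ring

theorem pvMapRange_getD (f : ℕ → ℤ) (L t : ℕ) (d : ℤ) :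
    ((List.range L).map f).getD t d = if t < L then f t else d := by
  rcases Nat.lt_or_ge t L with h | h
  · simp [List.getD_eq_getElem?_getD, List.getElem?_map, List.getElem?_range, h]
  · rw [if_neg (by omega)]
    have hl : ((List.range L).map f).length ≤ t := by
      rw [List.length_map, List.length_range]; exact h
    rw [List.getD_eq_getElem?_getD, List.getElem?_eq_none hl, Option.getD_none]

theorem pvG_proper (k : ℕ) {d : ℕ} (hd : 1 ≤ d) :
    ∑ e ∈ d.properDivisors, pvG k e = (d:ℤ)^k - pvG k d := by
  have h := pvG_sum k (x := d) (by omega)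
  rw [← Nat.insert_self_properDivisors (by omega : d ≠ 0), Finset.sum_insert Nat.self_notMem_properDivisors] at h
  linarith

-- B side: the multiple-subtraction pass
theorem pvBatchSub_spec (dN : ℕ) (h1 : 1 ≤ dN) :
    ∀ (ms : List Int) (f : List ℤ), ms.Nodup → (∀ mm ∈ ms, (dN:ℤ) < mm ∧ mm.toNat < f.length) →
    let f1 := ms.foldl (fun f m => f.set m.toNat (f.getD m.toNat 0 - f.getD (dN:ℤ).toNat 0)) f
    f1.length = f.length ∧
    (∀ nn : ℕ, f1.getD nn 0 = (if ((nn:ℤ)) ∈ ms then f.getD nn 0 - f.getD dN 0 else f.getD nn 0)) := by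
  intro ms
  induction ms with
  | nil => intro f _ _; exact ⟨rfl, by intro nn; simp⟩
  | cons mm rest ih =>
    intro f hnd hbd
    simp only [Int.toNat_natCast] at ih ⊢
    have hmm := hbd mm (List.mem_cons_self)
    have hmmpos : (0:ℤ) < mm := by omega
    set f' := f.set mm.toNat (f.getD mm.toNat 0 - f.getD dN 0) with hf'
    have hlen' : f'.length = f.length := List.length_set ..
    have hnd' : rest.Nodup := (List.nodup_cons.mp hnd).2
    have hnm : mm ∉ rest := (List.nodup_cons.mp hnd).1
    have hbd' : ∀ x ∈ rest, (dN:ℤ) < x ∧ x.toNat < f'.length := by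
      intro x hx
      have := hbd x (List.mem_cons_of_mem _ hx)
      exact ⟨this.1, by omega⟩
    obtain ⟨ihl, ihc⟩ := ih f' hnd' hbd'
    have hfd : f'.getD dN 0 = f.getD dN 0 := by
      have hne : mm.toNat ≠ dN := by omega
      rw [hf']
      simp [List.getD_eq_getElem?_getD, List.getElem?_set_ne hne]
    refine ⟨by simpa [hlen'] using ihl, ?_⟩
    intro nn
    simp only [List.foldl_cons]
    by_cases hnnm : (nn:ℤ) = mm
    · have hnn : nn = mm.toNat := by omega
      have hnotin : (nn:ℤ) ∉ rest := hnnm ▸ fun h => hnm h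
      rw [ihc nn, if_neg hnotin]
      have hin : ((nn:ℤ)) ∈ mm :: rest := by rw [hnnm]; exact List.mem_cons_self
      rw [if_pos hin, hf', hnn]
      have hlt : mm.toNat < f.length := hmm.2
      simp [List.getD_eq_getElem?_getD, hlt]
    · have hne : mm.toNat ≠ nn := by
        intro h
        apply hnnm
        omega
      have hfn : f'.getD nn 0 = f.getD nn 0 := by
        rw [hf']
        simp [List.getD_eq_getElem?_getD, List.getElem?_set_ne hne]
      rw [ihc nn, hfd, hfn]
      by_cases hr : (nn:ℤ) ∈ rest
      · simp [hr, List.mem_cons]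
      · simp [hr, List.mem_cons, hnnm]

theorem pvMobius_inv (k L : ℕ) (h1 : 1 ≤ L) :
    ∀ t, t ≤ L →
    let f1 := (PySem.List.pyRange 1 ((t:ℤ)+1) 1).foldl (pvMobiusStep (L:ℤ))
      (0 :: (PySem.List.pyRange 1 ((L:ℤ)+1) 1).map (fun d => d ^ k))
    f1.length = L+1 ∧
    (∀ nn, nn ≤ L → f1.getD nn 0 =
      (if 1 ≤ nn then ((nn:ℤ))^k - ∑ e ∈ nn.properDivisors.filter (· ≤ t), pvG k e else 0)) := by
  intro t
  induction t with
  | zero =>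
    intro _
    have hr : PySem.List.pyRange 1 (((0:ℕ):ℤ)+1) 1 = [] := by
      rw [show ((0:ℕ):ℤ) + 1 = 1 by norm_num, PySem.List.pyRange_of_pos _ _ one_pos]
      simp
    rw [hr]
    simp only [List.foldl_nil]
    constructor
    · simp [pvRange1, List.length_map, List.length_range]
    · intro nn hnn
      rcases Nat.eq_zero_or_pos nn with h0 | h0
      · subst h0; simp
      · have hfil : nn.properDivisors.filter (· ≤ 0) = ∅ := by
          refine Finset.filter_false_of_mem ?_
          intro e he
          have := (Nat.mem_properDivisors.mp he).1
          have := Nat.pos_of_mem_properDivisors he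
          omega
        rw [if_pos (by omega : 1 ≤ nn), hfil, Finset.sum_empty, sub_zero]
        have hcons : (0 :: (PySem.List.pyRange 1 ((L:ℤ)+1) 1).map (fun d => d ^ k)).getD nn 0
            = ((PySem.List.pyRange 1 ((L:ℤ)+1) 1).map (fun d => d ^ k)).getD (nn-1) 0 := by
          obtain ⟨j, rfl⟩ : ∃ j, nn = j + 1 := ⟨nn - 1, by omega⟩
          simp [List.getD_cons_succ]
        rw [hcons, pvRange1, List.map_map, pvMapRange_getD, if_pos (by omega)]
        have : ((nn - 1 : ℕ) : ℤ) + 1 = (nn : ℤ) := by push_cast; omega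
        simp only [Function.comp]
        rw [this]
  | succ t ih =>
    intro hle
    have ⟨ihl, ihc⟩ := ih (by omega)
    set f1 := (PySem.List.pyRange 1 ((t:ℤ)+1) 1).foldl (pvMobiusStep (L:ℤ))
      (0 :: (PySem.List.pyRange 1 ((L:ℤ)+1) 1).map (fun d => d ^ k)) with hf1
    have hr : PySem.List.pyRange 1 ((((t+1:ℕ)):ℤ)+1) 1 = PySem.List.pyRange 1 ((t:ℤ)+1) 1 ++ [(t:ℤ)+1] := by
      have := PySem.List.pyRange_one_succ_right (a := 1) (b := (t:ℤ)+1) (by omega)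
      push_cast
      rw [this]
    rw [hr, List.foldl_append, ← hf1]
    simp only [List.foldl_cons, List.foldl_nil]
    unfold pvMobiusStep
    set d : ℕ := t + 1 with hd
    have hdz : ((t:ℤ)+1) = (d:ℤ) := by push_cast; omega
    rw [hdz]
    set ms := PySem.List.pyRange (2*(d:ℤ)) ((L:ℤ)+1) (d:ℤ) with hms
    have hdpos : (0:ℤ) < (d:ℤ) := by push_cast; omega
    have hmem : ∀ x : ℤ, x ∈ ms ↔ 2*(d:ℤ) ≤ x ∧ x < (L:ℤ)+1 ∧ (d:ℤ) ∣ x - 2*(d:ℤ) := by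
      intro x; rw [hms]; exact PySem.List.mem_pyRange_iff_of_pos hdpos x
    have hbd : ∀ mm ∈ ms, ((d:ℕ):ℤ) < mm ∧ mm.toNat < f1.length := by
      intro mm hmm
      obtain ⟨h1, h2, _⟩ := (hmem mm).mp hmm
      constructor
      · omega
      · rw [ihl]; omega
    obtain ⟨hbl, hbc⟩ := pvBatchSub_spec d (by omega) ms f1 (pvRange_nodup _ _ _ hdpos) hbd
    have hf1len : f1.length = L + 1 := ihl
    have hf1d : f1.getD d 0 = pvG k d := by
      rw [ihc d (by omega), if_pos (by omega)]
      have hfil : d.properDivisors.filter (· ≤ t) = d.properDivisors := by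
        refine Finset.filter_true_of_mem ?_
        intro e he
        have := (Nat.mem_properDivisors.mp he).2
        omega
      rw [hfil, pvG_proper k (by omega : 1 ≤ d)]
      ring
    constructor
    · rw [hbl, hf1len]
    · intro nn hnn
      rw [hbc nn, hf1d]
      by_cases hin : ((nn:ℤ)) ∈ ms
      · obtain ⟨h1, h2, h3⟩ := (hmem _).mp hin
        have h2d : 2*d ≤ nn := by omega
        have hdvd : d ∣ nn := by
          have h4 : (d:ℤ) ∣ 2*(d:ℤ) := Dvd.intro 2 (mul_comm (d:ℤ) 2)
          have h5 : (d:ℤ) ∣ (nn:ℤ) := by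
            have := dvd_add h3 h4
            rwa [sub_add_cancel] at this
          exact_mod_cast h5
        have hdp : d ∈ nn.properDivisors := Nat.mem_properDivisors.mpr ⟨hdvd, by omega⟩
        rw [if_pos hin, ihc nn hnn, if_pos (by omega : 1 ≤ nn), if_pos (by omega : 1 ≤ nn)]
        have hsplit : nn.properDivisors.filter (· ≤ t+1) = insert d (nn.properDivisors.filter (· ≤ t)) := by
          ext e
          simp only [Finset.mem_insert, Finset.mem_filter]
          constructor
          · rintro ⟨he, het⟩
            rcases Nat.lt_or_ge e d with h | h
            · exact Or.inr ⟨he, by omega⟩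
            · exact Or.inl (by omega)
          · rintro (rfl | ⟨he, het⟩)
            · exact ⟨hdp, by omega⟩
            · exact ⟨he, by omega⟩
        rw [hsplit, Finset.sum_insert (by simp [Finset.mem_filter]; omega)]
        ring
      · rw [if_neg hin, ihc nn hnn]
        rcases Nat.eq_zero_or_pos nn with h0 | h0
        · subst h0; simp
        · rw [if_pos (by omega), if_pos (by omega)]
          have hfil : nn.properDivisors.filter (· ≤ t+1) = nn.properDivisors.filter (· ≤ t) := by
            refine Finset.filter_congr ?_
            intro e he
            have hed : e ≠ d := by
              rintro rfl
              obtain ⟨hdvd, hlt⟩ := Nat.mem_properDivisors.mp he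
              obtain ⟨c, rfl⟩ := hdvd
              have hc2 : 2 ≤ c := by
                rcases c with _ | _ | c
                · omega
                · omega
                · omega
              apply hin
              rw [hmem]
              refine ⟨by push_cast; nlinarith, by push_cast; omega, ⟨(c:ℤ) - 2, by push_cast; ring⟩⟩
            omega
          rw [hfil]


theorem pvIccRange (L : ℕ) (f : ℕ → ℤ) : ∑ d ∈ Finset.Icc 1 L, f d = ∑ j ∈ Finset.range L, f (j+1) := by
  induction L with
  | zero => simp
  | succ t ih => rw [Finset.sum_Icc_succ_top (by omega), ih, Finset.sum_range_succ]

-- assembling lemma: both ports compute pvRef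
theorem pvA_eq_ref (N M K : Int) (hpos : 0 < min N M) :
    compute_sum_gcd_power_py N M K = pvRef K.toNat (min N M).toNat N.toNat M.toNat := by
  set L := (min N M).toNat with hLd
  set k := K.toNat with hk
  set n := N.toNat with hn
  set m := M.toNat with hm
  have hle1 : min N M ≤ N := min_le_left _ _
  have hle2 : min N M ≤ M := min_le_right _ _
  have hlim : min N M = (L:ℤ) := (Int.toNat_of_nonneg hpos.le).symm
  have hLpos : 1 ≤ L := by
    have h0 : (0:ℤ) < (L:ℤ) := hlim ▸ hpos
    exact_mod_cast h0
  have hNpos : 0 < N := lt_of_lt_of_le hpos hle1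
  have hMpos : 0 < M := lt_of_lt_of_le hpos hle2
  have hNn : N = (n:ℤ) := (Int.toNat_of_nonneg hNpos.le).symm
  have hMm : M = (m:ℤ) := (Int.toNat_of_nonneg hMpos.le).symm
  have hLmin : L = min n m := by
    have : min N M = ((min n m : ℕ) : ℤ) := by rw [hNn, hMm]; push_cast; rfl
    rw [hLd, this, Int.toNat_natCast]
  unfold compute_sum_gcd_power_py
  simp only [if_neg (not_le.mpr hpos)]
  rw [hlim, hNn, hMm, Int.toNat_natCast]
  -- bridge the Array state to the List model
  rw [pvGroupLoopA_eq]
  have hgen : ∀ (l : List Int) (st0 : Array Bool × Array Int × Array Int × Array Int),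
      pvStToList (l.foldl (pvSieveStepA (L:ℤ) K) st0) = l.foldl (pvSieveStep (L:ℤ) K) (pvStToList st0) := by
    intro l
    induction l with
    | nil => intro st0; rfl
    | cons x xs ih =>
      intro st0
      simp only [List.foldl_cons]
      rw [ih, pvStepA_eq]
  have hstL : pvStToList ((PySem.List.pyRange 2 ((L:ℤ)+1) 1).foldl (pvSieveStepA (L:ℤ) K)
      (Array.replicate (L+1) false, (Array.replicate (L+1) (0:ℤ)).setIfInBounds 1 1, #[], #[]))
      = (PySem.List.pyRange 2 ((L:ℤ)+1) 1).foldl (pvSieveStep (L:ℤ) K)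
        (List.replicate (L+1) false, (List.replicate (L+1) (0:ℤ)).set 1 1, [], []) := by
    rw [hgen]
    congr 1
    unfold pvStToList
    simp only [Array.toList_replicate, Array.toList_setIfInBounds]
  have h21 : ((PySem.List.pyRange 2 ((L:ℤ)+1) 1).foldl (pvSieveStepA (L:ℤ) K)
      (Array.replicate (L+1) false, (Array.replicate (L+1) (0:ℤ)).setIfInBounds 1 1, #[], #[])).2.1.toList
      = ((PySem.List.pyRange 2 ((L:ℤ)+1) 1).foldl (pvSieveStep (L:ℤ) K)
        (List.replicate (L+1) false, (List.replicate (L+1) (0:ℤ)).set 1 1, [], [])).2.1 :=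
    congrArg (fun t => t.2.1) hstL
  rw [pvFoldl_toList
      (fun f (i : Int) => f.setIfInBounds i.toNat (f.getD i.toNat 0 + f.getD (i-1).toNat 0))
      (fun f (i : Int) => f.set i.toNat (f.getD i.toNat 0 + f.getD (i-1).toNat 0))
      (fun a x => by rw [Array.toList_setIfInBounds, pvAGetD, pvAGetD]), h21]
  have hinv := pvFold_spec k L hLpos K hk.symm L hLpos le_rfl
  obtain ⟨_, _, _, hflen, _, hfc⟩ := hinv
  set st := (PySem.List.pyRange 2 ((L:ℤ)+1) 1).foldl (pvSieveStep (L:ℤ) K)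
    (List.replicate (L+1) false, (List.replicate (L+1) (0:ℤ)).set 1 1, [], []) with hst
  have hchar : ∀ nn, nn ≤ L → st.2.1.getD nn 0 = (if 1 ≤ nn then pvG k nn else 0) := by
    intro nn hnn
    rw [hfc nn hnn]
    unfold pvFV
    by_cases h1 : 1 ≤ nn
    · rw [pvCovB_top h1 hnn, if_pos rfl, if_pos h1]
    · have h0 : nn = 0 := by omega
      subst h0
      rw [pvCovB_zero]
      simp
  obtain ⟨hf1l, hf1c⟩ := pvPrefix_spec k L hLpos st.2.1 hflen hchar L le_rfl
  set f1 := (PySem.List.pyRange 1 ((L:ℤ)+1) 1).foldl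
    (fun f j => f.set j.toNat (f.getD j.toNat 0 + f.getD (j-1).toNat 0)) st.2.1 with hf1
  have hf : ∀ nn, nn ≤ L → f1.getD nn 0 = ∑ d ∈ Finset.Icc 1 nn, pvG k d := by
    intro nn hnn
    rw [hf1c nn hnn]
    by_cases h1 : 1 ≤ nn
    · rw [if_pos ⟨h1, hnn⟩]
    · have h0 : nn = 0 := by omega
      subst h0
      rw [if_neg (by omega), if_neg (by omega)]
      simp
  have hone : (1:ℤ) = ((1:ℕ):ℤ) := by norm_num
  rw [hone, pvGroup_spec k L n m hLmin hLpos f1 hf (L+1) 1 le_rfl (by omega) 0, zero_add]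
  rfl

theorem pvB_eq_ref (N M K : Int) (hpos : 0 < min N M) :
    compute_sum_gcd_power_py_alt N M K = pvRef K.toNat (min N M).toNat N.toNat M.toNat := by
  set L := (min N M).toNat with hL
  set k := K.toNat with hk
  set n := N.toNat with hn
  set m := M.toNat with hm
  have hle1 : min N M ≤ N := min_le_left _ _
  have hle2 : min N M ≤ M := min_le_right _ _
  have hlim : min N M = (L:ℤ) := (Int.toNat_of_nonneg hpos.le).symm
  have hLpos : 1 ≤ L := by
    have h0 : (0:ℤ) < (L:ℤ) := hlim ▸ hpos
    exact_mod_cast h0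
  have hNpos : 0 < N := lt_of_lt_of_le hpos hle1
  have hMpos : 0 < M := lt_of_lt_of_le hpos hle2
  have hNn : N = (n:ℤ) := (Int.toNat_of_nonneg hNpos.le).symm
  have hMm : M = (m:ℤ) := (Int.toNat_of_nonneg hMpos.le).symm
  unfold compute_sum_gcd_power_py_alt
  simp only [if_neg (not_le.mpr hpos)]
  rw [hlim, hNn, hMm, ← hk]
  -- bridge the Array state to the List model
  have hfa : ((PySem.List.pyRange 1 ((L:ℤ)+1) 1).foldl (pvMobiusStepA (L:ℤ))
      ((0 :: 1 :: (PySem.List.pyRange 2 ((L:ℤ)+1) 1).map (fun d => d ^ k)).toArray)).toList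
      = (PySem.List.pyRange 1 ((L:ℤ)+1) 1).foldl (pvMobiusStep (L:ℤ))
        (0 :: 1 :: (PySem.List.pyRange 2 ((L:ℤ)+1) 1).map (fun d => d ^ k)) := by
    rw [pvFoldl_toList (pvMobiusStepA (L:ℤ)) (pvMobiusStep (L:ℤ))
      (fun a x => pvMobiusStepA_eq (L:ℤ) a x), List.toList_toArray]
  simp only [pvAGetD, hfa]
  -- the initial list [0, 1] ++ [d^k for d in 2..L] is [0] ++ [d^k for d in 1..L] since 1^k = 1
  have hinit : (0 :: 1 :: (PySem.List.pyRange 2 ((L:ℤ)+1) 1).map (fun d => d ^ k))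
      = 0 :: (PySem.List.pyRange 1 ((L:ℤ)+1) 1).map (fun d => d ^ k) := by
    rw [PySem.List.pyRange_one_cons (by push_cast; omega : (1:ℤ) < (L:ℤ)+1)]
    simp
  simp only [hinit]
  obtain ⟨hfl, hfc⟩ := pvMobius_inv k L hLpos L le_rfl
  set f := (PySem.List.pyRange 1 ((L:ℤ)+1) 1).foldl (pvMobiusStep (L:ℤ))
      (0 :: (PySem.List.pyRange 1 ((L:ℤ)+1) 1).map (fun d => d ^ k)) with hfdef
  have hfG : ∀ nn, 1 ≤ nn → nn ≤ L → f.getD nn 0 = pvG k nn := by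
    intro nn h1 h2
    rw [hfc nn h2, if_pos h1]
    have hfil : nn.properDivisors.filter (· ≤ L) = nn.properDivisors := by
      refine Finset.filter_true_of_mem ?_
      intro e he
      have := (Nat.mem_properDivisors.mp he).2
      omega
    rw [hfil, pvG_proper k h1]
    ring
  rw [pvRange1, List.map_map]
  have h0 : ∀ (g : ℕ → ℤ), ((List.range L).map g).sum = ∑ j ∈ Finset.range L, g j := by
    intro g; rfl
  rw [h0]
  unfold pvRef
  rw [pvIccRange]
  refine Finset.sum_congr rfl ?_
  intro j hj
  have hjL : j + 1 ≤ L := by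
    have := Finset.mem_range.mp hj
    omega
  simp only [Function.comp]
  have ht : ((j:ℤ)+1) = ((j+1:ℕ):ℤ) := by push_cast; ring
  rw [ht, Int.toNat_natCast, PySem.Int.floordiv_natCast, PySem.Int.floordiv_natCast,
    hfG (j+1) (by omega) hjL]

-- ===== VERDICT (by name: the statement is the Claim_ definition above) =====
theorem compute_sum_gcd_power_py_spec : Claim_equal_compute_sum_gcd_power_py := by
  intro N M K _ _hpre
  unfold Spec_compute_sum_gcd_power_py
  by_cases hpos : min N M ≤ 0
  · unfold compute_sum_gcd_power_py compute_sum_gcd_power_py_alt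
    simp [hpos]
  · have hpos : 0 < min N M := by omega
    rw [pvA_eq_ref N M K hpos, pvB_eq_ref N M K hpos]
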